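-- pv_equiv track=rewrite | github.com/chaithanya739/SIGMA | sigma.py | non_zeroes_per_row
-- ===== SOURCE A (Python) =====
-- def non_zeroes_per_row(A,bitmap_A):
--     count=0
--     non_zero_per_row = []
--     for i in range(len(bitmap_A)):
--         non_zero_per_row_temp = []
--         for j in range(len(bitmap_A[0])):
--             if(bitmap_A[i][j] != 0):
--                 non_zero_per_row_temp.append(A[count])
--                 count=count+1
--         non_zero_per_row.append(non_zero_per_row_temp)
--     return non_zero_per_row
-- ===== SOURCE B (Python) =====
-- def non_zeroes_per_row(A, bitmap_A):
--     # Two-pass: first a table of per-row nonzero counts, then slice A by running offset.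
--     w = len(bitmap_A[0]) if bitmap_A else 0
--     counts = [sum(1 for j in range(w) if row[j] != 0) for row in bitmap_A]
--     out = []
--     pos = 0
--     for c in counts:
--         out.append([A[pos + k] for k in range(c)])
--         pos += c
--     return out
-- ===== Notes on version B (the rewrite author's own statement) =====
-- stated objective: alternative
-- what changed: Replaces the single interleaved nested loop with a running counter into A by a two-pass scheme: first a table of per-row nonzero counts, then a second pass that slices A positionally by a running offset.
import Mathlib
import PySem

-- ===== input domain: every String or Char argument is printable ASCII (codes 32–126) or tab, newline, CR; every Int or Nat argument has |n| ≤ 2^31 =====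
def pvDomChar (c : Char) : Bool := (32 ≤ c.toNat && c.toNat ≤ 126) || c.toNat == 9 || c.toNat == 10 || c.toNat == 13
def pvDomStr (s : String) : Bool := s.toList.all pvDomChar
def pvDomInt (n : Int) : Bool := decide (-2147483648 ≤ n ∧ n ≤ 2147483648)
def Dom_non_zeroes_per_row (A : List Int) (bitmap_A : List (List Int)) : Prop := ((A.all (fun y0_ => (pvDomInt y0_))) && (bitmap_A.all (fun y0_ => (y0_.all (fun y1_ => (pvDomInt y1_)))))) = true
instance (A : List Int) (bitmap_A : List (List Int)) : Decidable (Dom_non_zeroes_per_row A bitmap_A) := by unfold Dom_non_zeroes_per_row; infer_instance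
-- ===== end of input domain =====

-- B replaces A's single interleaved nested loop (one running counter into A) by a two-pass
-- scheme: a table of per-row nonzero counts, then a second pass slicing A by a running offset
-- (objective: alternative decomposition, same cost).

-- ===== PORT A =====
def non_zeroes_per_row (A : List Int) (bitmap_A : List (List Int)) : List (List Int) :=
  -- count = 0; non_zero_per_row = []; for i in range(len(bitmap_A)): … ; return non_zero_per_row
  (((PySem.List.pyRange 0 (PySem.List.len bitmap_A) 1).foldl
     (fun (st : Int × List (List Int)) i =>
       let row := PySem.List.pyGetD bitmap_A i []
       -- non_zero_per_row_temp = []; for j in range(len(bitmap_A[0])): if bitmap_A[i][j] != 0: append A[count]; count += 1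
       let inner := (PySem.List.pyRange 0 (PySem.List.len (PySem.List.pyGetD bitmap_A 0 [])) 1).foldl
         (fun (st2 : Int × List Int) j =>
           if PySem.List.pyGetD row j 0 ≠ 0
           then (st2.1 + 1, st2.2 ++ [PySem.List.pyGetD A st2.1 0])
           else st2) (st.1, ([] : List Int))
       (inner.1, st.2 ++ [inner.2]))
     ((0 : Int), ([] : List (List Int))))).2

-- ===== PORT B =====
def non_zeroes_per_row_alt (A : List Int) (bitmap_A : List (List Int)) : List (List Int) :=
  -- w = len(bitmap_A[0]) if bitmap_A else 0
  let w : Int := if bitmap_A.isEmpty then 0 else PySem.List.len (PySem.List.pyGetD bitmap_A 0 [])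
  -- counts = [sum(1 for j in range(w) if row[j] != 0) for row in bitmap_A]
  let counts : List Int := bitmap_A.map (fun row =>
    (((PySem.List.pyRange 0 w 1).filter (fun j => PySem.List.pyGetD row j 0 ≠ 0)).length : Int))
  -- out = []; pos = 0; for c in counts: out.append([A[pos+k] for k in range(c)]); pos += c
  (counts.foldl (fun (st : Int × List (List Int)) c =>
     (st.1 + c, st.2 ++ [(PySem.List.pyRange 0 c 1).map (fun k => PySem.List.pyGetD A (st.1 + k) 0)]))
     ((0 : Int), ([] : List (List Int)))).2

-- ===== PRECONDITION & SPEC =====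
-- Pre_ excludes exactly the inputs on which A raises IndexError: some row shorter than row 0
-- (bitmap_A[i][j] out of range), or A shorter than the total number of counted nonzero cells.
def Pre_non_zeroes_per_row (A : List Int) (bitmap_A : List (List Int)) : Prop :=
  (∀ row ∈ bitmap_A, (bitmap_A.headD []).length ≤ row.length) ∧
  (bitmap_A.map (fun row => (row.take (bitmap_A.headD []).length).countP (fun x => x ≠ 0))).sum ≤ A.length
instance (A : List Int) (bitmap_A : List (List Int)) : Decidable (Pre_non_zeroes_per_row A bitmap_A) := by unfold Pre_non_zeroes_per_row; infer_instance

def pvWitness_non_zeroes_per_row : List Int × List (List Int) := ([7, -3, 5], [[1, 0], [0, 2], [3, 0]])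

def Spec_non_zeroes_per_row (A : List Int) (bitmap_A : List (List Int)) (out : List (List Int)) : Prop := out = non_zeroes_per_row_alt A bitmap_A
instance (A : List Int) (bitmap_A : List (List Int)) (out : List (List Int)) : Decidable (Spec_non_zeroes_per_row A bitmap_A out) := by unfold Spec_non_zeroes_per_row; infer_instance

-- ===== CLAIM (what is proved, stated in full; the proofs are below) =====
def Claim_equal_non_zeroes_per_row : Prop := ∀ (A : List Int) (bitmap_A : List (List Int)), Dom_non_zeroes_per_row A bitmap_A → Pre_non_zeroes_per_row A bitmap_A → Spec_non_zeroes_per_row A bitmap_A (non_zeroes_per_row A bitmap_A)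

-- ===== LEMMAS AND PROOFS =====

-- A's inner loop from counter s: appends A[s], A[s+1], …, one per nonzero cell.
theorem inner_loop_eq (Av row : List Int) :
    ∀ (js : List Int) (s : Int) (acc : List Int),
      js.foldl
        (fun (st2 : Int × List Int) j =>
          if PySem.List.pyGetD row j 0 ≠ 0
          then (st2.1 + 1, st2.2 ++ [PySem.List.pyGetD Av st2.1 0])
          else st2) (s, acc)
      = (s + ((js.filter (fun j => PySem.List.pyGetD row j 0 ≠ 0)).length : Int),
         acc ++ (List.range (js.filter (fun j => PySem.List.pyGetD row j 0 ≠ 0)).length).map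
                  (fun k : Nat => PySem.List.pyGetD Av (s + (k : Int)) 0)) := by
  intro js
  induction js with
  | nil => intro s acc; simp
  | cons j js ih =>
    intro s acc
    by_cases h : PySem.List.pyGetD row j 0 ≠ 0
    · rw [List.foldl_cons, if_pos h, ih]
      have hf : List.filter (fun j => decide (PySem.List.pyGetD row j 0 ≠ 0)) (j :: js)
          = j :: List.filter (fun j => decide (PySem.List.pyGetD row j 0 ≠ 0)) js := by
        simp [h]
      rw [hf, List.length_cons, List.range_succ_eq_map, List.map_cons, List.map_map]
      simp only [Prod.mk.injEq, Nat.cast_zero, add_zero, List.append_assoc,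
        List.singleton_append]
      refine ⟨by push_cast; ring, ?_⟩
      congr 1
      congr 1
      apply List.map_congr_left
      intro k _
      simp only [Function.comp_apply]
      congr 1
      push_cast
      ring
    · rw [List.foldl_cons, if_neg h]
      have hf : List.filter (fun j => decide (PySem.List.pyGetD row j 0 ≠ 0)) (j :: js)
          = List.filter (fun j => decide (PySem.List.pyGetD row j 0 ≠ 0)) js := by
        simp [h]
      rw [hf]
      exact ih s acc

-- B's per-row slice of A equals the mapped List.range form used above.
theorem slice_eq (Av : List Int) (n : Nat) (s : Int) :
    (PySem.List.pyRange 0 (n : Int) 1).map (fun k => PySem.List.pyGetD Av (s + k) 0)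
      = (List.range n).map (fun k : Nat => PySem.List.pyGetD Av (s + (k : Int)) 0) := by
  rw [PySem.List.pyRange_one]
  simp only [sub_zero, Int.toNat_natCast, List.map_map]
  apply List.map_congr_left
  intro k _
  simp

theorem non_zeroes_per_row_spec : Claim_equal_non_zeroes_per_row := by
  unfold Claim_equal_non_zeroes_per_row
  intro A bitmap_A _ _
  unfold Spec_non_zeroes_per_row non_zeroes_per_row non_zeroes_per_row_alt
  cases bitmap_A with
  | nil => simp [PySem.List.pyRange_one_eq_nil, PySem.List.len]
  | cons r rs =>
    simp only [List.isEmpty_cons, Bool.false_eq_true, if_false]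
    rw [PySem.List.foldl_pyRange_zero_pyGetD (r :: rs) []
      (fun (st : Int × List (List Int)) row =>
        let inner := (PySem.List.pyRange 0 (PySem.List.len (PySem.List.pyGetD (r :: rs) 0 [])) 1).foldl
          (fun (st2 : Int × List Int) j =>
            if PySem.List.pyGetD row j 0 ≠ 0
            then (st2.1 + 1, st2.2 ++ [PySem.List.pyGetD A st2.1 0])
            else st2) (st.1, ([] : List Int))
        (inner.1, st.2 ++ [inner.2])) ((0 : Int), ([] : List (List Int)))]
    rw [List.foldl_map]
    congr 2
    funext st row
    rw [inner_loop_eq, slice_eq]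
    simp
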